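-- pv_equiv track=rewrite | github.com/hernamesbarbara/cloakpivot | cloakpivot/masking/template_helpers.py | generate_email_template
-- ===== SOURCE A (Python) =====
-- def generate_email_template(original_text: str) -> str:
--     """Generate format-preserving template for email addresses."""
--     if "@" not in original_text:
--         return "[EMAIL]"
--
--     username, domain = original_text.split("@", 1)
--
--     # Preserve username length and domain structure
--     username_template = "x" * len(username)
--
--     # Preserve domain structure
--     if "." in domain:
--         domain_parts = domain.split(".")
--         domain_template = ".".join("x" * len(part) for part in domain_parts)
--     else:
--         domain_template = "x" * len(domain)
--
--     return f"{username_template}@{domain_template}"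
-- ===== SOURCE B (Python) =====
-- def generate_email_template(original_text: str) -> str:
--     """Generate format-preserving template for email addresses."""
--     if "@" not in original_text:
--         return "[EMAIL]"
--     out = []
--     seen_at = False
--     for ch in original_text:
--         if ch == "@" and not seen_at:
--             out.append("@")
--             seen_at = True
--         elif ch == "." and seen_at:
--             out.append(".")
--         else:
--             out.append("x")
--     return "".join(out)
-- ===== Notes on version B (the rewrite author's own statement) =====
-- stated objective: simpler
-- what changed: Replaces the split/join/replicate pipeline (split on '@', per-part 'x'*len, re-join domain parts on '.') with a single left-to-right character pass maintaining a seen_at flag, never splitting the string.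
import Mathlib
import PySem

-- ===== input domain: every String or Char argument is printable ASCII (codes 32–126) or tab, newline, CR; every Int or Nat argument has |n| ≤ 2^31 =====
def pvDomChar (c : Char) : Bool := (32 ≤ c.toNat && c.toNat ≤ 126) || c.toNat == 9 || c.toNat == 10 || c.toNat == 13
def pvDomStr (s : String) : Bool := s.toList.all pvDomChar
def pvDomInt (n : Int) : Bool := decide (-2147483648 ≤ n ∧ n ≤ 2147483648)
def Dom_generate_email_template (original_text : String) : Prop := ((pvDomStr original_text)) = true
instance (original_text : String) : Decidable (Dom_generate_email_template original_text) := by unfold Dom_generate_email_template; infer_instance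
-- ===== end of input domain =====

-- B replaces A's split/join/replicate pipeline by a single stateful left-to-right pass (objective: simpler).

-- ===== PORT A =====
def generate_email_template (original_text : String) : String :=
  if PySem.Str.isIn "@" original_text = false then "[EMAIL]"
  else
    -- username, domain = original_text.split("@", 1)  ('@' is in the string, so exactly two pieces)
    let parts := PySem.Chars.splitOnMax original_text.toList ['@'] 1
    let username := parts.getD 0 []
    let domain := parts.getD 1 []
    let username_template := List.replicate username.length 'x'
    let domain_template :=
      if PySem.Chars.isIn ['.'] domain then
        PySem.Chars.join ['.']
          ((PySem.Chars.splitOn domain ['.']).map (fun p => List.replicate p.length 'x'))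
      else List.replicate domain.length 'x'
    String.ofList (username_template ++ ['@'] ++ domain_template)

-- ===== PORT B =====
def pvStepB (acc : List Char × Bool) (c : Char) : List Char × Bool :=
  if c = '@' && !acc.2 then (acc.1 ++ ['@'], true)
  else if c = '.' && acc.2 then (acc.1 ++ ['.'], acc.2)
  else (acc.1 ++ ['x'], acc.2)

def generate_email_template_alt (original_text : String) : String :=
  if PySem.Str.isIn "@" original_text = false then "[EMAIL]"
  else
    String.ofList (original_text.toList.foldl pvStepB ([], false)).1

-- ===== PRECONDITION & SPEC =====
def Spec_generate_email_template (original_text : String) (out : String) : Prop := out = generate_email_template_alt original_text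
instance (original_text : String) (out : String) : Decidable (Spec_generate_email_template original_text out) := by unfold Spec_generate_email_template; infer_instance

-- ===== CLAIM (what is proved, stated in full; the proofs are below) =====
def Claim_equal_generate_email_template : Prop := ∀ (original_text : String), Dom_generate_email_template original_text → Spec_generate_email_template original_text (generate_email_template original_text)

-- ===== LEMMAS AND PROOFS =====

-- character map both programs realise on the domain part
def pvDot (c : Char) : Char := if c = '.' then '.' else 'x'

-- first-occurrence split of a list containing '@'
lemma pv_first_split {cs : List Char} (h : '@' ∈ cs) :
    ∃ u d, cs = u ++ '@' :: d ∧ '@' ∉ u := by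
  induction cs with
  | nil => cases h
  | cons c rest ih =>
    by_cases hc : c = '@'
    · exact ⟨[], rest, by simp [hc], by simp⟩
    · rcases ih (by rcases List.mem_cons.mp h with h | h; exacts [absurd h.symm hc, h]) with ⟨u, d, h1, h2⟩
      exact ⟨c :: u, d, by simp [h1], by simp [h2, eq_comm, hc]⟩

lemma pv_singleton_infix_iff (c : Char) (l : List Char) : [c] <:+: l ↔ c ∈ l := by
  constructor
  · rintro ⟨s, t, h⟩; subst h; simp
  · intro h; rcases List.append_of_mem h with ⟨s, t, rfl⟩; exact ⟨s, t, by simp⟩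

lemma pv_isIn_true {c : Char} {l : List Char} : PySem.Chars.isIn [c] l = true ↔ c ∈ l := by
  rw [PySem.Chars.isIn_iff_infix, pv_singleton_infix_iff]

-- ---- A side: splitOnMax with maxsplit 1 at the first '@' ----
lemma pv_goMax_after (d : List Char) (acc : List (List Char)) (fuel : Nat) (hf : 1 ≤ fuel) :
    PySem.Chars.splitOnMax.go ['@'] fuel 0 d [] acc = (d :: acc).reverse := by
  cases d with
  | nil => cases fuel with
    | zero => simp [PySem.Chars.splitOnMax.go]
    | succ n => simp [PySem.Chars.splitOnMax.go]
  | cons c rest => cases fuel with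
    | zero => omega
    | succ n => simp [PySem.Chars.splitOnMax.go]

lemma pv_goMax (u : List Char) : ∀ (d cur : List Char) (acc : List (List Char)) (fuel : Nat),
    '@' ∉ u → u.length + 2 ≤ fuel →
    PySem.Chars.splitOnMax.go ['@'] fuel 1 (u ++ '@' :: d) cur acc
      = (d :: (cur.reverse ++ u) :: acc).reverse := by
  induction u with
  | nil =>
    intro d cur acc fuel _ hf
    cases fuel with
    | zero => omega
    | succ n =>
      simp only [List.nil_append, PySem.Chars.splitOnMax.go]
      have hp : List.isPrefixOf ['@'] ('@' :: d) = true := by simp [List.isPrefixOf]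
      simp [hp, pv_goMax_after d _ n (by omega)]
  | cons c rest ih =>
    intro d cur acc fuel hmem hf
    have hc : c ≠ '@' := fun h => hmem (by simp [h])
    cases fuel with
    | zero => omega
    | succ n =>
      simp only [List.cons_append, PySem.Chars.splitOnMax.go]
      have hp : List.isPrefixOf ['@'] (c :: (rest ++ '@' :: d)) = false := by
        simp [List.isPrefixOf, (Ne.symm hc)]
      simp only [hp, Bool.false_eq_true, if_false]
      rw [ih d (c :: cur) acc n (fun h => hmem (by simp [h])) (by simp at hf ⊢; omega)]
      simp

lemma pv_splitMax (u d : List Char) (hu : '@' ∉ u) :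
    PySem.Chars.splitOnMax (u ++ '@' :: d) ['@'] 1 = [u, d] := by
  unfold PySem.Chars.splitOnMax
  rw [if_neg (by norm_num)]
  rw [show (1 : Int).toNat = 1 from rfl]
  rw [pv_goMax u d [] [] _ hu (by simp; try omega)]
  simp

-- ---- A side: splitOn '.' then join equals pvDot map ----
-- structural first-piece split on '.'
def pvSplitDot (pre : List Char) : List Char → List (List Char)
  | [] => [pre]
  | c :: rest => if c = '.' then pre :: pvSplitDot [] rest else pvSplitDot (pre ++ [c]) rest

lemma pv_go_spec (l : List Char) : ∀ (cur : List Char) (acc : List (List Char)) (fuel : Nat),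
    l.length + 1 ≤ fuel →
    PySem.Chars.splitOn.go ['.'] fuel l cur acc = acc.reverse ++ pvSplitDot cur.reverse l := by
  induction l with
  | nil =>
    intro cur acc fuel hf
    cases fuel with
    | zero => omega
    | succ n => simp [PySem.Chars.splitOn.go, pvSplitDot]
  | cons c rest ih =>
    intro cur acc fuel hf
    cases fuel with
    | zero => omega
    | succ n =>
      by_cases hc : c = '.'
      · subst hc
        have hp : List.isPrefixOf ['.'] ('.' :: rest) = true := by simp [List.isPrefixOf]
        simp only [PySem.Chars.splitOn.go, hp, if_true, List.length_singleton,
          List.drop_succ_cons, List.drop_zero]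
        rw [ih [] (cur.reverse :: acc) n (by simp at hf ⊢; omega)]
        simp [pvSplitDot]
      · have hp : List.isPrefixOf ['.'] (c :: rest) = false := by
          simp [List.isPrefixOf, (Ne.symm hc)]
        simp only [PySem.Chars.splitOn.go, hp, Bool.false_eq_true, if_false]
        rw [ih (c :: cur) acc n (by simp at hf ⊢; omega)]
        simp [pvSplitDot, hc]

lemma pv_splitOn_eq (d : List Char) :
    PySem.Chars.splitOn d ['.'] = pvSplitDot [] d := by
  unfold PySem.Chars.splitOn
  rw [pv_go_spec d [] [] (d.length + 1) (by omega)]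
  simp

lemma pv_splitDot_ne_nil (pre l : List Char) : pvSplitDot pre l ≠ [] := by
  induction l generalizing pre with
  | nil => simp [pvSplitDot]
  | cons c rest ih =>
    by_cases hc : c = '.' <;> simp [pvSplitDot, hc, ih]

lemma pv_join_splitDot (l : List Char) : ∀ pre : List Char,
    PySem.Chars.join ['.'] ((pvSplitDot pre l).map (fun p => List.replicate p.length 'x'))
      = List.replicate pre.length 'x' ++ l.map pvDot := by
  induction l with
  | nil => intro pre; simp [pvSplitDot, PySem.Chars.join_singleton]
  | cons c rest ih =>
    intro pre
    by_cases hc : c = '.'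
    · subst hc
      simp only [pvSplitDot, if_true, List.map_cons]
      rcases hl : pvSplitDot ([] : List Char) rest with _ | ⟨p, ps⟩
      · exact absurd hl (pv_splitDot_ne_nil [] rest)
      · rw [List.map_cons, PySem.Chars.join_cons_cons]
        have := ih []
        rw [hl] at this
        simp only [List.map_cons] at this
        simp [this, pvDot]
    · simp only [pvSplitDot, if_neg hc]
      rw [ih (pre ++ [c])]
      simp [pvDot, hc, List.replicate_succ']

-- when '.' is not in d, the map is all 'x'
lemma pv_map_no_dot (d : List Char) (h : '.' ∉ d) :
    d.map pvDot = List.replicate d.length 'x' := by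
  induction d with
  | nil => simp
  | cons c rest ih =>
    have hc : c ≠ '.' := fun hh => h (by simp [hh])
    simp only [List.map_cons, List.length_cons, List.replicate_succ]
    rw [ih (fun hh => h (by simp [hh]))]
    simp [pvDot, hc]

-- ---- B side: the fold over u ++ '@' :: d ----
lemma pv_fold_seen (d : List Char) : ∀ out : List Char,
    d.foldl pvStepB (out, true) = (out ++ d.map pvDot, true) := by
  induction d with
  | nil => intro out; simp
  | cons c rest ih =>
    intro out
    by_cases hc : c = '.'
    · simp [pvStepB, hc, ih, pvDot]
    · have h1 : pvStepB (out, true) c = (out ++ ['x'], true) := by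
        simp [pvStepB, hc]
      simp only [List.foldl_cons, h1, ih]
      simp [pvDot, hc]

lemma pv_fold_unseen (u : List Char) (hu : '@' ∉ u) : ∀ (d out : List Char),
    (u ++ '@' :: d).foldl pvStepB (out, false)
      = (out ++ List.replicate u.length 'x' ++ '@' :: d.map pvDot, true) := by
  induction u with
  | nil =>
    intro d out
    have h1 : pvStepB (out, false) '@' = (out ++ ['@'], true) := by simp [pvStepB]
    simp only [List.nil_append, List.foldl_cons, h1, pv_fold_seen]
    simp
  | cons c rest ih =>
    intro d out
    have hc : c ≠ '@' := fun h => hu (by simp [h])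
    have h1 : pvStepB (out, false) c = (out ++ ['x'], false) := by simp [pvStepB, hc]
    simp only [List.cons_append, List.foldl_cons, h1]
    rw [ih (fun h => hu (by simp [h])) d (out ++ ['x'])]
    simp [List.replicate_succ]

-- ===== VERDICT (by name: the statement is the Claim_ definition above) =====
theorem generate_email_template_spec : Claim_equal_generate_email_template := by
  intro s _
  unfold Spec_generate_email_template generate_email_template generate_email_template_alt
  by_cases hin : PySem.Str.isIn "@" s = false
  · rw [if_pos hin, if_pos hin]
  · rw [if_neg hin, if_neg hin]
    have ht : PySem.Str.isIn "@" s = true := by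
      revert hin; cases PySem.Str.isIn "@" s <;> simp
    have hch : PySem.Chars.isIn ['@'] s.toList = true := ht
    rcases pv_first_split (pv_isIn_true.mp hch) with ⟨u, d, hcs, hu⟩
    rw [hcs, pv_splitMax u d hu, pv_fold_unseen u hu d []]
    simp only [List.getD_cons_zero, List.getD_cons_succ, List.nil_append]
    congr 1
    by_cases hd : PySem.Chars.isIn ['.'] d
    · rw [if_pos hd, pv_splitOn_eq, pv_join_splitDot d []]
      simp
    · rw [if_neg hd]
      have hnd : '.' ∉ d := fun h => hd (pv_isIn_true.mpr h)
      rw [pv_map_no_dot d hnd]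
      simp
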